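-- pv_equiv track=rewrite | github.com/JuninhoPAJ/Simulador-de-gerenciamento-de-mem-ria | algoritmos.py | encontrar_espacos_livres
-- ===== SOURCE A (Python) =====
-- def encontrar_espacos_livres(memoria):
--     livres = []
--     inicio = None
--     for i, bloco in enumerate(memoria):
--         if bloco is None:
--             if inicio is None:
--                 inicio = i
--         else:
--             if inicio is not None:
--                 livres.append((inicio, i - inicio))
--                 inicio = None
--     if inicio is not None:
--         livres.append((inicio, len(memoria) - inicio))
--     return livres
-- ===== SOURCE B (Python) =====
-- def encontrar_espacos_livres(memoria):
--     livres = []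
--     i, n = 0, len(memoria)
--     while i < n:
--         if memoria[i] is not None:
--             i += 1
--         else:
--             j = i
--             while j < n and memoria[j] is None:
--                 j += 1
--             livres.append((i, j - i))
--             i = j
--     return livres
-- ===== Notes on version B (the rewrite author's own statement) =====
-- stated objective: alternative
-- what changed: Replaces A's one-element-at-a-time state machine (a sentinel 'inicio' plus a post-loop flush) by a two-pointer run scan: jump over each maximal run of free blocks at once, append (start, run length), no sentinel and no flush branch.
import Mathlib
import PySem

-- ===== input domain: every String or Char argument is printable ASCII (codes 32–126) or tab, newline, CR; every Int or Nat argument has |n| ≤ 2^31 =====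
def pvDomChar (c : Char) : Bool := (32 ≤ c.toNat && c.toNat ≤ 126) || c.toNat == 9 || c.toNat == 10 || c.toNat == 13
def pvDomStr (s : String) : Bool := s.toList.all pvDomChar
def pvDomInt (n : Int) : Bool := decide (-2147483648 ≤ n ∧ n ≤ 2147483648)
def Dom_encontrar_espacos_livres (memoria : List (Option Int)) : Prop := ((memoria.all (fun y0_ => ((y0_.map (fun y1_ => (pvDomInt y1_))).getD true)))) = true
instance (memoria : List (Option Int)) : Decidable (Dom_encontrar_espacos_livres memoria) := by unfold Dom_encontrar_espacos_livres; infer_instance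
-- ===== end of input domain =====

-- B replaces A's sentinel-state machine with a two-pointer maximal-run scan (alternative decomposition, same cost).


-- ===== PORT A =====
-- A's for-loop over enumerate(memoria) as structural recursion over the list,
-- carrying the same state: the index i, the accumulator livres and the sentinel inicio.
def aLoop : List (Option Int) → Nat → List (Int × Int) → Option Int → List (Int × Int) × Option Int
  | [], _, livres, inicio => (livres, inicio)
  | bloco :: rest, i, livres, inicio =>
    match bloco with
    | none =>
      match inicio with
      | none => aLoop rest (i + 1) livres (some (i : Int))
      | some _ => aLoop rest (i + 1) livres inicio
    | some _ =>
      match inicio with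
      | none => aLoop rest (i + 1) livres none
      | some ini => aLoop rest (i + 1) (livres ++ [(ini, (i : Int) - ini)]) none

def encontrar_espacos_livres (memoria : List (Option Int)) : List (Int × Int) :=
  match aLoop memoria 0 [] none with
  | (livres, none) => livres
  | (livres, some ini) => livres ++ [(ini, (memoria.length : Int) - ini)]

-- ===== PORT B =====
-- Source B's inner while loop: length of the leading run of None blocks.
def altRun : List (Option Int) → Nat
  | none :: rest => 1 + altRun rest
  | _ => 0

-- Source B's outer while loop: at an occupied block advance by one; at a free block
-- measure the whole run, emit (i, run length) and jump past it.
def altGo (xs : List (Option Int)) (i : Nat) : List (Int × Int) :=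
  match xs with
  | [] => []
  | some _ :: rest => altGo rest (i + 1)
  | none :: rest =>
      ((i : Int), ((1 + altRun rest : Nat) : Int)) ::
        altGo (rest.drop (altRun rest)) (i + (1 + altRun rest))
termination_by xs.length
decreasing_by
  all_goals simp

def encontrar_espacos_livres_alt (memoria : List (Option Int)) : List (Int × Int) :=
  altGo memoria 0

-- ===== PRECONDITION & SPEC =====
def Spec_encontrar_espacos_livres (memoria : List (Option Int)) (out : List (Int × Int)) : Prop := out = encontrar_espacos_livres_alt memoria
instance (memoria : List (Option Int)) (out : List (Int × Int)) : Decidable (Spec_encontrar_espacos_livres memoria out) := by unfold Spec_encontrar_espacos_livres; infer_instance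

-- ===== CLAIM (what is proved, stated in full; the proofs are below) =====
def Claim_equal_encontrar_espacos_livres : Prop := ∀ (memoria : List (Option Int)), Dom_encontrar_espacos_livres memoria → Spec_encontrar_espacos_livres memoria (encontrar_espacos_livres memoria)

-- ===== LEMMAS AND PROOFS =====

-- Unfolding equations for altGo (well-founded recursion), one per branch.
theorem altGo_nil (i : Nat) : altGo [] i = [] := by rw [altGo]

theorem altGo_some (v : Int) (rest : List (Option Int)) (i : Nat) :
    altGo (some v :: rest) i = altGo rest (i + 1) := by rw [altGo]

theorem altGo_none (rest : List (Option Int)) (i : Nat) :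
    altGo (none :: rest) i =
      ((i : Int), ((1 + altRun rest : Nat) : Int)) ::
        altGo (rest.drop (altRun rest)) (i + (1 + altRun rest)) := by rw [altGo]


-- A's post-loop flush, abstracted over the total length used in the final pair.
def finishA (p : List (Int × Int) × Option Int) (t : Int) : List (Int × Int) :=
  match p with
  | (livres, none) => livres
  | (livres, some ini) => livres ++ [(ini, t - ini)]

theorem encontrar_eq_finish (memoria : List (Option Int)) :
    encontrar_espacos_livres memoria =
      finishA (aLoop memoria 0 [] none) (memoria.length : Int) := by
  unfold encontrar_espacos_livres finishA
  rcases aLoop memoria 0 [] none with ⟨l, _ | ini⟩ <;> rfl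

-- Joint invariant for both sentinel states of A's loop, by strong induction on length.
theorem main_inv : ∀ (n : Nat) (xs : List (Option Int)) (i : Nat)
    (livres : List (Int × Int)) (ini : Int), xs.length ≤ n →
    (finishA (aLoop xs i livres none) ((i + xs.length : Nat) : Int)
        = livres ++ altGo xs i)
    ∧ (finishA (aLoop xs i livres (some ini)) ((i + xs.length : Nat) : Int)
        = livres ++ (ini, (((i + altRun xs : Nat) : Int) - ini)) ::
            altGo (xs.drop (altRun xs)) (i + altRun xs)) := by
  intro n
  induction n with
  | zero =>
    intro xs i livres ini h
    have hx : xs = [] := List.length_eq_zero_iff.mp (Nat.le_zero.mp h)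
    subst hx
    simp [aLoop, finishA, altGo_nil, altRun]
  | succ n ih =>
    intro xs i livres ini h
    match xs with
    | [] => simp [aLoop, finishA, altGo_nil, altRun]
    | some v :: rest =>
      have hr : rest.length ≤ n := by simpa using Nat.le_of_succ_le_succ (by simpa using h)
      constructor
      · have := (ih rest (i + 1) livres ini hr).1
        simp only [aLoop, altGo_some]
        rw [show ((i + (some v :: rest).length : Nat) : Int)
              = ((i + 1 + rest.length : Nat) : Int) by simp; omega]
        exact this
      · have := (ih rest (i + 1) (livres ++ [(ini, (i : Int) - ini)]) ini hr).1
        simp only [aLoop, altRun, altGo_some, List.drop_zero]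
        rw [show ((i + (some v :: rest).length : Nat) : Int)
              = ((i + 1 + rest.length : Nat) : Int) by simp; omega]
        rw [this]
        simp
    | none :: rest =>
      have hr : rest.length ≤ n := by simpa using Nat.le_of_succ_le_succ (by simpa using h)
      have key : ∀ (lv : List (Int × Int)) (j : Int),
          finishA (aLoop rest (i + 1) lv (some j)) ((i + (none :: rest).length : Nat) : Int)
            = lv ++ (j, (((i + 1 + altRun rest : Nat) : Int) - j)) ::
                altGo (rest.drop (altRun rest)) (i + 1 + altRun rest) := by
        intro lv j
        have := (ih rest (i + 1) lv j hr).2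
        rw [show ((i + (none :: rest).length : Nat) : Int)
              = ((i + 1 + rest.length : Nat) : Int) by simp; omega]
        exact this
      constructor
      · simp only [aLoop]
        rw [key livres (i : Int)]
        rw [altGo_none]
        have e1 : ((i + 1 + altRun rest : Nat) : Int) - (i : Int)
            = ((1 + altRun rest : Nat) : Int) := by push_cast; ring
        have e2 : i + 1 + altRun rest = i + (1 + altRun rest) := by omega
        rw [e1, e2]
      · simp only [aLoop]
        rw [key livres ini]
        have e3 : altRun (none :: rest) = 1 + altRun rest := rfl
        have e4 : (none :: rest).drop (1 + altRun rest) = rest.drop (altRun rest) := by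
          rw [Nat.add_comm]; rfl
        have e5 : i + (1 + altRun rest) = i + 1 + altRun rest := by omega
        rw [e3, e4, e5]

-- ===== VERDICT (by name: the statement is the Claim_ definition above) =====
theorem encontrar_espacos_livres_spec : Claim_equal_encontrar_espacos_livres := by
  intro memoria _
  unfold Spec_encontrar_espacos_livres encontrar_espacos_livres_alt
  rw [encontrar_eq_finish]
  have := (main_inv memoria.length memoria 0 [] 0 (Nat.le_refl _)).1
  simpa using this
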